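-- pv_equiv track=rewrite | github.com/vanilla111/CQUPT_Spider | CQUPT_Spider/utils/common.py | get_main_content
-- ===== SOURCE A (Python) =====
-- def get_main_content(content_list, _limitCount=180, _depth=5, _appendMode=False):
--     """
--     能够从过滤html标签后的文本中找到正文文本的起止行号，行号之间的文本就是网页正文部分。
--     特性：正文部分的文本密度要高出非正文部分很多。
--     :param content_list: 去除html标签后的文本，按行拆分为list
--     :param _limitCount: 候选文本长度达到该值时，认为进入正文部分
--     :param _depth: 每次分析几行数据
--     :return: 正文内容
--     """
--     preTextLen = 0 # 上一次统计的字符数量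
--     startPos = -1 # 记录文章起始位置
--     _headEmptyLines = 2
--     _endLimitCharCount = 20
--     content = []
--     line = []
--     for i in range(len(content_list) - _depth):
--         length = 0
--         for j in range(_depth):
--             length += len(content_list[i + j])
--
--         if startPos == -1:
--             # 还没找到正文位置
--             if (preTextLen > _limitCount) and (length > 0):
--                 # 查找文章起始位置，发现两行连续为空认为是头部
--                 emptyCount = 0
--                 for j in range(i - 1, 0, -1):
--                     if isNullOrWhiteSpace(content_list[j]):
--                         emptyCount += 1
--                     else:
--                         emptyCount = 0
--                     if emptyCount == _headEmptyLines:
--                         startPos = j + _headEmptyLines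
--                         break
--                 # 如果没有定位到正文开始，以当前位置为起始
--                 if startPos == -1:
--                     startPos = i
--                 for j in range(startPos, i + 1):
--                     # 将发现的正文放入list
--                     content.append(content_list[j])
--                     line.append(j)
--         else:
--             # 如当前长度、上一次长度都小于阈值，认为已经结束，若开启追加模式，则继续往后找
--             if length <= _endLimitCharCount and preTextLen < _endLimitCharCount:
--                 if not _appendMode:
--                     break
--                 startPos = -1
--             line.append(i)
--             content.append(content_list[i])
--         preTextLen = length
--     # 返回发现的正文内容
--     return '\n'.join(content), [min(line), max(line)] if len(line) > 0 else [0, 0]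
--
-- def isNullOrWhiteSpace(content):
--     return content or len(content) == 0
-- ===== SOURCE B (Python) =====
-- def get_main_content(content_list, _limitCount=180, _depth=5, _appendMode=False):
--     # Prefix sums of line lengths replace the inner per-window summation; A's
--     # head-empty backscan is dropped because its emptiness test is always true,
--     # so the detected body always starts at the current line.
--     n = len(content_list)
--     if _depth <= 0:
--         # every analysis window is empty, so no body is ever detected
--         return '', [0, 0]
--     pref = [0]
--     acc = 0
--     for s in content_list:
--         acc += len(s)
--         pref.append(acc)
--     preTextLen = 0
--     in_body = False
--     content = []
--     line = []
--     for i in range(n - _depth):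
--         length = pref[i + _depth] - pref[i]
--         if not in_body:
--             if preTextLen > _limitCount and length > 0:
--                 in_body = True
--                 content.append(content_list[i])
--                 line.append(i)
--         else:
--             if length <= 20 and preTextLen < 20:
--                 if not _appendMode:
--                     break
--                 in_body = False
--             content.append(content_list[i])
--             line.append(i)
--         preTextLen = length
--     return '\n'.join(content), [min(line), max(line)] if len(line) > 0 else [0, 0]
-- ===== Notes on version B (the rewrite author's own statement) =====
-- stated objective: faster
-- what changed: B precomputes a prefix-sum array of line lengths so each window length is one subtraction instead of a _depth-long inner loop, and replaces the always-vacuous head-empty backscan plus fill loop (A's emptiness test is true on every string, so the detected body always starts at the current line) by a single append of the current line.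
import Mathlib
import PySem

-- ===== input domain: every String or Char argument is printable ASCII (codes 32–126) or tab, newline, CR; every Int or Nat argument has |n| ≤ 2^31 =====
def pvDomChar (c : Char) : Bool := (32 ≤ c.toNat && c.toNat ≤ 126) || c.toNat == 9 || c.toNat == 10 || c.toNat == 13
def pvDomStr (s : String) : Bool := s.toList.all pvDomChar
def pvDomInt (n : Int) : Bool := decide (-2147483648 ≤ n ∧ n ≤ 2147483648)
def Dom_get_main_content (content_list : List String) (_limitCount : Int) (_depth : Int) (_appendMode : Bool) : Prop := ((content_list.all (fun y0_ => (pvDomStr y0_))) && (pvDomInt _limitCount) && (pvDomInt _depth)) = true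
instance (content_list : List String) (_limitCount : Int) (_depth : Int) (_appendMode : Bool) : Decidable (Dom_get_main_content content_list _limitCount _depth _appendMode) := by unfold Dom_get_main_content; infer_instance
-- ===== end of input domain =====

-- B replaces A's inner per-window length summation by a prefix-sum array and drops the
-- head-empty backscan (whose emptiness test is always true, so the body start is always
-- the current line); equality of return values is proved below.

-- ===== PORT A =====

-- helper isNullOrWhiteSpace: `content or len(content) == 0` used for truthiness
def pvIsNullOrWS (content : String) : Bool :=
  (content.toList ≠ []) || (PySem.Str.len content == 0)

-- the `for j in range(i-1, 0, -1)` backscan with emptyCount and break; returns startPos (-1 = not found)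
def pvABackscan (xs : List String) : List Int → Int → Int
  | [], _ => -1
  | j :: rest, emptyCount =>
    let emptyCount' := if pvIsNullOrWS (PySem.List.pyGetD xs j "") then emptyCount + 1 else 0
    if emptyCount' == 2 then j + 2 else pvABackscan xs rest emptyCount'

-- `length = 0; for j in range(_depth): length += len(content_list[i+j])`
def pvAWindow (xs : List String) (depth i : Int) : Int :=
  (PySem.List.pyRange 0 depth 1).foldl
    (fun acc j => acc + PySem.Str.len (PySem.List.pyGetD xs (i + j) "")) 0

-- the main `for i in range(len(content_list) - _depth)` loop; breaks by returning the state
def pvALoop (xs : List String) (lim depth : Int) (app : Bool) :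
    List Int → Int → Int → List String → List Int → List String × List Int
  | [], _, _, content, line => (content, line)
  | i :: rest, preTextLen, startPos, content, line =>
    let length := pvAWindow xs depth i
    if startPos == -1 then
      if preTextLen > lim && length > 0 then
        let sp1 := pvABackscan xs (PySem.List.pyRange (i - 1) 0 (-1)) 0
        let sp2 := if sp1 == -1 then i else sp1
        let fill := PySem.List.pyRange sp2 (i + 1) 1
        pvALoop xs lim depth app rest length sp2
          (content ++ fill.map (fun j => PySem.List.pyGetD xs j "")) (line ++ fill)
      else
        pvALoop xs lim depth app rest length startPos content line
    else
      if length ≤ 20 && preTextLen < 20 then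
        if !app then (content, line)  -- break
        else
          pvALoop xs lim depth app rest length (-1)
            (content ++ [PySem.List.pyGetD xs i ""]) (line ++ [i])
      else
        pvALoop xs lim depth app rest length startPos
          (content ++ [PySem.List.pyGetD xs i ""]) (line ++ [i])

-- `return '\n'.join(content), [min(line), max(line)] if len(line) > 0 else [0, 0]`
-- (identical return expression in both Pythons)
def pvFinish (r : List String × List Int) : String × List Int :=
  (PySem.Str.join "\n" r.1,
    if r.2.length > 0 then
      [(PySem.List.min? r.2 (fun x => x)).getD 0, (PySem.List.max? r.2 (fun x => x)).getD 0]
    else [0, 0])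

def get_main_content (content_list : List String) (_limitCount : Int) (_depth : Int) (_appendMode : Bool) : String × List Int :=
  pvFinish (pvALoop content_list _limitCount _depth _appendMode
    (PySem.List.pyRange 0 ((content_list.length : Int) - _depth) 1) 0 (-1) [] [])

-- ===== PORT B =====

-- `pref = [0]; acc = 0; for s in content_list: acc += len(s); pref.append(acc)`
def pvBPref : List String → Int → List Int
  | [], _ => []
  | s :: rest, acc => (acc + PySem.Str.len s) :: pvBPref rest (acc + PySem.Str.len s)

def pvBLoop (xs : List String) (pref : List Int) (lim depth : Int) (app : Bool) :
    List Int → Int → Bool → List String → List Int → List String × List Int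
  | [], _, _, content, line => (content, line)
  | i :: rest, preTextLen, inBody, content, line =>
    let length := PySem.List.pyGetD pref (i + depth) 0 - PySem.List.pyGetD pref i 0
    if !inBody then
      if preTextLen > lim && length > 0 then
        pvBLoop xs pref lim depth app rest length true
          (content ++ [PySem.List.pyGetD xs i ""]) (line ++ [i])
      else
        pvBLoop xs pref lim depth app rest length false content line
    else
      if length ≤ 20 && preTextLen < 20 then
        if !app then (content, line)  -- break
        else
          pvBLoop xs pref lim depth app rest length false
            (content ++ [PySem.List.pyGetD xs i ""]) (line ++ [i])
      else
        pvBLoop xs pref lim depth app rest length true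
          (content ++ [PySem.List.pyGetD xs i ""]) (line ++ [i])

def get_main_content_alt (content_list : List String) (_limitCount : Int) (_depth : Int) (_appendMode : Bool) : String × List Int :=
  if _depth ≤ 0 then ("", [0, 0])  -- every analysis window is empty: no body is ever detected
  else
    pvFinish (pvBLoop content_list (0 :: pvBPref content_list 0) _limitCount _depth _appendMode
      (PySem.List.pyRange 0 ((content_list.length : Int) - _depth) 1) 0 false [] [])

-- ===== PRECONDITION & SPEC =====
def Spec_get_main_content (content_list : List String) (_limitCount : Int) (_depth : Int) (_appendMode : Bool) (out : String × List Int) : Prop := out = get_main_content_alt content_list _limitCount _depth _appendMode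
instance (content_list : List String) (_limitCount : Int) (_depth : Int) (_appendMode : Bool) (out : String × List Int) : Decidable (Spec_get_main_content content_list _limitCount _depth _appendMode out) := by unfold Spec_get_main_content; infer_instance

-- ===== CLAIM (what is proved, stated in full; the proofs are below) =====
def Claim_equal_get_main_content : Prop := ∀ (content_list : List String) (_limitCount : Int) (_depth : Int) (_appendMode : Bool), Dom_get_main_content content_list _limitCount _depth _appendMode → Spec_get_main_content content_list _limitCount _depth _appendMode (get_main_content content_list _limitCount _depth _appendMode)

-- ===== LEMMAS AND PROOFS =====

-- the "emptiness" predicate of A is true on every string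
lemma pvIsNullOrWS_true (s : String) : pvIsNullOrWS s = true := by
  unfold pvIsNullOrWS
  by_cases h : s.toList = [] <;> simp [h, PySem.Str.len_eq]

-- the backscan followed by the `-1` fallback always yields the current index i (0 ≤ i)
lemma pvABackscan_two (xs : List String) (j1 j2 : Int) (rest : List Int) :
    pvABackscan xs (j1 :: j2 :: rest) 0 = j2 + 2 := by
  simp [pvABackscan, pvIsNullOrWS_true]

lemma pvStart_eq (xs : List String) (i : Int) (hi : 0 ≤ i) :
    (let sp1 := pvABackscan xs (PySem.List.pyRange (i - 1) 0 (-1)) 0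
     if sp1 == -1 then i else sp1) = i := by
  rcases lt_or_ge i 3 with h3 | h3
  · interval_cases i <;> simp [pvABackscan, pvIsNullOrWS_true, PySem.List.pyRange_neg_one_eq_nil,
      PySem.List.pyRange_neg_one_cons]
  · rw [PySem.List.pyRange_neg_one_cons (by omega), PySem.List.pyRange_neg_one_cons (by omega)]
    rw [pvABackscan_two]
    simp; omega

-- sum of the lengths of the first m lines
def pvSumLen (l : List String) : Int := (l.map PySem.Str.len).sum

lemma pvBPref_getD (xs : List String) (a : Int) (m : Nat) (hm : m < xs.length) :
    (pvBPref xs a).getD m 0 = a + pvSumLen (xs.take (m + 1)) := by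
  induction xs generalizing a m with
  | nil => simp at hm
  | cons s t ih =>
    cases m with
    | zero => simp [pvBPref, pvSumLen]
    | succ m =>
      simp only [pvBPref, List.getD_cons_succ, List.take_succ_cons]
      rw [ih _ m (by simpa using hm)]
      simp [pvSumLen]; ring

lemma pvPref_lookup (xs : List String) (k : Int) (hk0 : 0 ≤ k) (hkn : k ≤ (xs.length : Int)) :
    PySem.List.pyGetD (0 :: pvBPref xs 0) k 0 = pvSumLen (xs.take k.toNat) := by
  have hk : k = ((k.toNat : Nat) : Int) := (Int.toNat_of_nonneg hk0).symm
  rw [hk, PySem.List.pyGetD_natCast]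
  cases hm : k.toNat with
  | zero => simp [pvSumLen]
  | succ m =>
    simp only [List.getD_cons_succ]
    rw [pvBPref_getD xs 0 m (by omega)]
    simp

lemma pvSumLen_take_succ (xs : List String) (m : Nat) (hm : m < xs.length) :
    pvSumLen (xs.take (m + 1)) = pvSumLen (xs.take m) + PySem.Str.len xs[m] := by
  have := List.sum_take_succ (L := xs.map PySem.Str.len) (i := m) (by simpa using hm)
  simpa [pvSumLen] using this

lemma pvWindow_aux (xs : List String) (i : Int) (hi : 0 ≤ i) :
    ∀ d : Nat, i + (d : Int) ≤ (xs.length : Int) →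
    (PySem.List.pyRange 0 (d : Int) 1).foldl
      (fun acc j => acc + PySem.Str.len (PySem.List.pyGetD xs (i + j) "")) 0
    = pvSumLen (xs.take (i.toNat + d)) - pvSumLen (xs.take i.toNat) := by
  intro d
  induction d with
  | zero => intro _; simp [PySem.List.pyRange_one_eq_nil]
  | succ d ih =>
    intro hle
    have hd1 : ((d : Int) + 1) = ((d + 1 : Nat) : Int) := by push_cast; ring
    rw [← hd1, PySem.List.pyRange_one_succ_right (by omega), List.foldl_append]
    have hlt : i.toNat + d < xs.length := by omega
    rw [ih (by omega)]
    simp only [List.foldl_cons, List.foldl_nil]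
    rw [PySem.List.pyGetD_eq_getElem (i := i + (d : Int)) xs "" (by omega)
        (by push_cast at hle ⊢; omega)]
    have ht : (i + (d : Int)).toNat = i.toNat + d := by omega
    have h3 : i.toNat + (d + 1) = (i.toNat + d) + 1 := by omega
    simp only [ht]
    rw [h3, pvSumLen_take_succ xs (i.toNat + d) hlt]
    ring

lemma pvAWindow_eq (xs : List String) (depth i : Int) (hd : 0 < depth) (hi : 0 ≤ i)
    (hn : i + depth ≤ (xs.length : Int)) :
    pvAWindow xs depth i = pvSumLen (xs.take (i + depth).toNat) - pvSumLen (xs.take i.toNat) := by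
  have hdep : depth = ((depth.toNat : Nat) : Int) := (Int.toNat_of_nonneg (by omega)).symm
  unfold pvAWindow
  rw [hdep, pvWindow_aux xs i hi depth.toNat (by omega)]
  have h2 : (i + (depth.toNat : Int)).toNat = i.toNat + depth.toNat := by omega
  rw [h2]

-- B's window length equals A's window length (0 < depth, i in range)
lemma pvLen_eq (xs : List String) (depth i : Int) (hd : 0 < depth) (hi : 0 ≤ i)
    (hn : i + depth ≤ (xs.length : Int)) :
    PySem.List.pyGetD (0 :: pvBPref xs 0) (i + depth) 0 - PySem.List.pyGetD (0 :: pvBPref xs 0) i 0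
      = pvAWindow xs depth i := by
  rw [pvPref_lookup xs (i + depth) (by omega) hn, pvPref_lookup xs i hi (by omega),
      pvAWindow_eq xs depth i hd hi hn]

-- the two loops agree, given matching states (startPos = -1 ⟷ not inBody)
lemma pvLoop_eq (xs : List String) (lim depth : Int) (app : Bool) (hd : 0 < depth) :
    ∀ L : List Int, (∀ i ∈ L, 0 ≤ i ∧ i + depth ≤ (xs.length : Int)) →
    ∀ pre sp inb content line, (sp = -1 ↔ inb = false) →
    pvALoop xs lim depth app L pre sp content line
      = pvBLoop xs (0 :: pvBPref xs 0) lim depth app L pre inb content line := by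
  intro L
  induction L with
  | nil => intro _ pre sp inb content line _; rfl
  | cons i rest ih =>
    intro hmem pre sp inb content line hrel
    obtain ⟨hi, hn⟩ := hmem i (by simp)
    have hrest : ∀ i ∈ rest, 0 ≤ i ∧ i + depth ≤ (xs.length : Int) :=
      fun j hj => hmem j (by simp [hj])
    have hlen := pvLen_eq xs depth i hd hi hn
    simp only [pvALoop, pvBLoop, hlen]
    by_cases hsp : sp = -1
    · have hinb : inb = false := hrel.mp hsp
      subst hinb
      simp only [hsp, beq_self_eq_true, if_true, Bool.not_false, if_true]
      by_cases hc : (pre > lim && pvAWindow xs depth i > 0) = true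
      · simp only [hc, if_true]
        rw [pvStart_eq xs i hi]
        rw [PySem.List.pyRange_one_singleton]
        simp only [List.map_cons, List.map_nil]
        exact ih hrest _ _ _ _ _ (by simp only [Bool.true_eq_false, iff_false]; omega)
      · simp only [hc]
        exact ih hrest _ _ _ _ _ (by simp)
    · have hinb : inb = true := by
        cases inb
        · exact absurd (hrel.mpr rfl) hsp
        · rfl
      subst hinb
      simp only [beq_iff_eq, hsp, if_false, Bool.not_true]
      by_cases hc : (pvAWindow xs depth i ≤ 20 && pre < 20) = true
      · simp only [hc, if_true]
        cases app
        · rfl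
        · simp only [Bool.not_true]
          exact ih hrest _ _ _ _ _ (by simp)
      · simp only [hc]
        exact ih hrest _ _ _ _ _ (by simp only [Bool.true_eq_false, iff_false]; exact hsp)

-- with a non-positive depth every window is empty, so A finds nothing
lemma pvALoop_depth_nonpos (xs : List String) (lim depth : Int) (app : Bool) (hd : depth ≤ 0) :
    ∀ L pre, pvALoop xs lim depth app L pre (-1) [] [] = ([], []) := by
  intro L
  induction L with
  | nil => intro pre; rfl
  | cons i rest ih =>
    intro pre
    have hw : pvAWindow xs depth i = 0 := by
      unfold pvAWindow
      rw [PySem.List.pyRange_one_eq_nil (by omega)]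
      rfl
    simp only [pvALoop, hw]
    simpa using ih _

theorem get_main_content_spec : Claim_equal_get_main_content := by
  intro xs lim depth app _
  unfold Spec_get_main_content get_main_content get_main_content_alt
  by_cases hd : depth ≤ 0
  · rw [if_pos hd, pvALoop_depth_nonpos xs lim depth app hd]
    rfl
  · rw [if_neg hd]
    congr 1
    apply pvLoop_eq xs lim depth app (by omega)
    · intro i hi
      rw [PySem.List.mem_pyRange_one] at hi
      constructor <;> omega
    · simp
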